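-- pv_equiv track=rewrite | github.com/GasimV/Pet-Projects | Speech Processing/FT-Scripts/test_fw.py | trim_overlap
-- ===== SOURCE A (Python) =====
-- def trim_overlap(acc_text: str, new_text: str, tail: int = 80, min_match: int = 20) -> str:
--     """acc_text kuyruğuyla new_text başı çakışırsa kırp."""
--     if not acc_text or not new_text:
--         return new_text
--     tail_seg = acc_text[-tail:]
--     k = min(len(tail_seg), len(new_text))
--     cut = 0
--     for i in range(k, min_match - 1, -1):
--         if tail_seg.endswith(new_text[:i]):
--             cut = i
--             break
--     return new_text[cut:] if cut > 0 else new_text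
-- ===== SOURCE B (Python) =====
-- def trim_overlap(acc_text: str, new_text: str, tail: int = 80, min_match: int = 20) -> str:
--     """acc_text kuyruğuyla new_text başı çakışırsa kırp."""
--     if not acc_text or not new_text:
--         return new_text
--     tail_seg = acc_text[-tail:]
--     k = min(len(tail_seg), len(new_text))
--     lo = max(min_match, 1)
--     MOD = 2305843009213693951
--     BASE = 131
--     # pre[i] = rolling hash of new_text[:i]; suf[i] = rolling hash of the
--     # last i characters of tail_seg.  built once; a candidate is compared via its table entries.
--     pre = [0]
--     for c in new_text[:k]:
--         pre.append((pre[-1] * BASE + ord(c)) % MOD)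
--     rev = tail_seg[::-1]
--     suf = [0]
--     pw = 1
--     for c in rev[:k]:
--         suf.append((suf[-1] + ord(c) * pw) % MOD)
--         pw = pw * BASE % MOD
--     # Scan candidate overlap lengths; the string compare runs only on hash hits.
--     for i in range(k, lo - 1, -1):
--         if pre[i] == suf[i] and tail_seg.endswith(new_text[:i]):
--             return new_text[i:]
--     return new_text
-- ===== Notes on version B (the rewrite author's own statement) =====
-- stated objective: alternative
-- what changed: Replaced the descending loop that re-runs endswith (an O(i) slice-and-compare) for every candidate overlap length with precomputed modular rolling-hash tables of new_text's prefixes and tail_seg's suffixes, so the scan compares two table entries per candidate and runs the string comparison only on hash hits (exact: every hit is verified).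
import Mathlib
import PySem

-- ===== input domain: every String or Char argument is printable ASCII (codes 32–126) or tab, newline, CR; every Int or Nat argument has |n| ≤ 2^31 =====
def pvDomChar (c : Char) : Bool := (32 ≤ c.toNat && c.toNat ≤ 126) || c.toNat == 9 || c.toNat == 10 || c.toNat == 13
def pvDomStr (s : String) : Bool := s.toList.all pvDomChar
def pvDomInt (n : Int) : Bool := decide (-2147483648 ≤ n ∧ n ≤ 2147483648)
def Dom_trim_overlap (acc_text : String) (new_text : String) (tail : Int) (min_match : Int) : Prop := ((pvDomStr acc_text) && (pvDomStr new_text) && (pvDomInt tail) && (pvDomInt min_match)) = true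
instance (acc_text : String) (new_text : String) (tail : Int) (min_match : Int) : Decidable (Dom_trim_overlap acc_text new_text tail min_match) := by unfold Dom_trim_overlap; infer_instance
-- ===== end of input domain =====

-- B precomputes modular rolling-hash tables of new_text's prefixes and tail_seg's
-- suffixes so the scan over candidate overlap lengths compares two table entries
-- instead of re-running endswith, verifying on hash hits (objective: alternative).

-- ===== PORT A =====
/-- `for i in range(k, min_match - 1, -1): if tail_seg.endswith(new_text[:i]): cut = i; break`
ported as descending recursion; the fuel is the length of the Python range. -/
def trimLoopA (tail_seg new_text : String) : Int → Nat → Int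
  | _, 0 => 0
  | i, fuel + 1 =>
      if PySem.Str.endswith tail_seg (PySem.Str.slice new_text none (some i)) then i
      else trimLoopA tail_seg new_text (i - 1) fuel

def trim_overlap (acc_text : String) (new_text : String) (tail : Int) (min_match : Int) : String :=
  if acc_text = "" || new_text = "" then new_text
  else
    let tail_seg := PySem.Str.slice acc_text (some (-tail)) none
    let k : Int := min (PySem.Str.len tail_seg) (PySem.Str.len new_text)
    let cut := trimLoopA tail_seg new_text k ((k - (min_match - 1)).toNat)
    if cut > 0 then PySem.Str.slice new_text (some cut) none else new_text

-- ===== PORT B =====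
/-- `pre = [0]; for c in new_text[:k]: pre.append((pre[-1]*BASE + ord(c)) % MOD)`. -/
def preListB : Int → List Char → List Int
  | h, [] => [h]
  | h, c :: cs =>
      h :: preListB (PySem.Int.mod (h * 131 + (c.toNat : Int)) 2305843009213693951) cs

/-- `suf = [0]; pw = 1; for c in rev[:k]: suf.append((suf[-1] + ord(c)*pw) % MOD); pw = pw*BASE % MOD`. -/
def sufListB : Int → Int → List Char → List Int
  | h, _, [] => [h]
  | h, pw, c :: cs =>
      h :: sufListB (PySem.Int.mod (h + (c.toNat : Int) * pw) 2305843009213693951)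
        (PySem.Int.mod (pw * 131) 2305843009213693951) cs

/-- `for i in range(k, lo - 1, -1): if pre[i] == suf[i] and tail_seg.endswith(new_text[:i]): return new_text[i:]`
ported as descending recursion returning the found index. -/
def trimLoopB (pre suf : List Int) (tail_seg new_text : String) : Int → Nat → Option Int
  | _, 0 => none
  | i, fuel + 1 =>
      if PySem.List.pyGetD pre i 0 = PySem.List.pyGetD suf i 0 ∧
          PySem.Str.endswith tail_seg (PySem.Str.slice new_text none (some i)) = true then some i
      else trimLoopB pre suf tail_seg new_text (i - 1) fuel

def trim_overlap_alt (acc_text : String) (new_text : String) (tail : Int) (min_match : Int) : String :=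
  if acc_text = "" || new_text = "" then new_text
  else
    let tail_seg := PySem.Str.slice acc_text (some (-tail)) none
    let k : Int := min (PySem.Str.len tail_seg) (PySem.Str.len new_text)
    let lo := max min_match 1
    let pre := preListB 0 (PySem.Str.slice new_text none (some k)).toList
    -- rev = tail_seg[::-1]; the value of PySem.Str.slice? tail_seg none none (-1)
    -- is String.ofList tail_seg.toList.reverse (PySem.Str.slice?_none_none_neg_one)
    let rev := String.ofList tail_seg.toList.reverse
    let suf := sufListB 0 1 (PySem.Str.slice rev none (some k)).toList
    match trimLoopB pre suf tail_seg new_text k ((k - (lo - 1)).toNat) with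
    | some i => PySem.Str.slice new_text (some i) none
    | none => new_text

-- ===== PRECONDITION & SPEC =====
def Spec_trim_overlap (acc_text : String) (new_text : String) (tail : Int) (min_match : Int) (out : String) : Prop := out = trim_overlap_alt acc_text new_text tail min_match
instance (acc_text : String) (new_text : String) (tail : Int) (min_match : Int) (out : String) : Decidable (Spec_trim_overlap acc_text new_text tail min_match out) := by unfold Spec_trim_overlap; infer_instance

-- ===== CLAIM (what is proved, stated in full; the proofs are below) =====
def Claim_equal_trim_overlap : Prop := ∀ (acc_text : String) (new_text : String) (tail : Int) (min_match : Int), Dom_trim_overlap acc_text new_text tail min_match → Spec_trim_overlap acc_text new_text tail min_match (trim_overlap acc_text new_text tail min_match)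

-- ===== LEMMAS AND PROOFS =====

/-- Horner hash (no modulus) of a list of characters, with seed `h`. -/
def hashPs (h : Int) (l : List Char) : Int := l.foldl (fun a c => a * 131 + (c.toNat : Int)) h

/-- Horner hash from the left, seed 0. -/
def hashP (l : List Char) : Int := hashPs 0 l

/-- Positional hash of a list of characters, from the right. -/
def hashR : List Char → Int
  | [] => 0
  | c :: l => (c.toNat : Int) + 131 * hashR l

/-- Descending first-match over indices base+s, …, base+1, default b. -/
def bestB (Q : Nat → Bool) (base : Nat) : Nat → Int → Int
  | 0, b => b
  | s + 1, b => if Q (base + s + 1) then ((base + s + 1 : Nat) : Int) else bestB Q base s b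

/-- Generic descending scan, first index (counting down from `i`) whose condition holds, else 0. -/
def descFirst (cond : Int → Bool) : Int → Nat → Int
  | _, 0 => 0
  | i, fuel + 1 => if cond i then i else descFirst cond (i - 1) fuel

/-- `Option`-valued variant of `descFirst`. -/
def descFirstO (cond : Int → Bool) : Int → Nat → Option Int
  | _, 0 => none
  | i, fuel + 1 => if cond i then some i else descFirstO cond (i - 1) fuel

theorem mod_eq_emod (x : Int) :
    PySem.Int.mod x 2305843009213693951 = x % 2305843009213693951 :=
  PySem.Int.mod_eq_emod_of_pos (by norm_num)

theorem hashP_append (u : List Char) (c : Char) :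
    hashP (u ++ [c]) = hashP u * 131 + (c.toNat : Int) := by
  simp [hashP, hashPs]

theorem hashP_eq_hashR_reverse (l : List Char) : hashP l = hashR l.reverse := by
  induction l using List.reverseRecOn with
  | nil => simp [hashP, hashPs, hashR]
  | append_singleton xs x ih => rw [hashP_append, ih]; simp [hashR]; ring

theorem bestB_false (Q : Nat → Bool) (base : Nat) : ∀ (s : Nat) (b : Int),
    (∀ i, base < i → i ≤ base + s → Q i = false) → bestB Q base s b = b := by
  intro s
  induction s with
  | zero => intro b _; rfl
  | succ s ih =>
    intro b h
    show (if Q (base + s + 1) then _ else bestB Q base s b) = b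
    rw [h (base + s + 1) (by omega) (by omega), ih b (fun i h1 h2 => h i h1 (by omega))]
    rfl

theorem bestB_nonneg (Q : Nat → Bool) (base : Nat) : ∀ (s : Nat) (b : Int),
    0 ≤ b → 0 ≤ bestB Q base s b := by
  intro s
  induction s with
  | zero => intro b hb; exact hb
  | succ s ih =>
    intro b hb
    show 0 ≤ (if Q (base + s + 1) then ((base + s + 1 : Nat) : Int) else bestB Q base s b)
    by_cases h : Q (base + s + 1)
    · rw [if_pos h]; exact Int.natCast_nonneg _
    · rw [if_neg h]; exact ih b hb

/-- A descending fuel scan from `jN` down to `start` equals the descending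
first-match `bestB` (with the search condition `Q`). -/
theorem descFirst_eq (cond : Int → Bool) (start : Int) (Q : Nat → Bool)
    (hQlow : ∀ i : Nat, (i : Int) < max start 1 → Q i = false)
    (h0 : start ≤ 0 → cond 0 = true) :
    ∀ jN : Nat,
    (∀ i : Nat, 1 ≤ i → start ≤ (i : Int) → i ≤ jN → Q i = cond (i : Int)) →
    descFirst cond (jN : Int) (((jN : Int) - (start - 1)).toNat) = bestB Q 0 jN 0 := by
  intro jN
  induction jN with
  | zero =>
    intro _
    by_cases hmm : start ≤ 0
    · rw [show (((0 : Nat) : Int) - (start - 1)).toNat = ((-start).toNat) + 1 from by omega]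
      show (if cond ((0 : Nat) : Int) then ((0 : Nat) : Int) else _) = _
      rw [show ((0 : Nat) : Int) = (0 : Int) from rfl, h0 hmm]; rfl
    · rw [show (((0 : Nat) : Int) - (start - 1)).toNat = 0 from by omega]; rfl
  | succ jN ih =>
    intro hQ
    by_cases hmm : start ≤ (jN : Int) + 1
    · rw [show (((jN + 1 : Nat) : Int) - (start - 1)).toNat
          = (((jN : Int) - (start - 1)).toNat) + 1 from by push_cast; omega]
      have hq := hQ (jN + 1) (by omega) (by push_cast; omega) (le_refl _)
      show (if cond ((jN + 1 : Nat) : Int) then ((jN + 1 : Nat) : Int)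
            else descFirst cond (((jN + 1 : Nat) : Int) - 1) (((jN : Int) - (start - 1)).toNat)) = _
      rw [← hq, show (((jN + 1 : Nat) : Int) - 1) = ((jN : Nat) : Int) from by push_cast; ring]
      have ih' := ih (fun i h1 h2 h3 => hQ i h1 h2 (by omega))
      show _ = (if Q (0 + jN + 1) then ((0 + jN + 1 : Nat) : Int) else bestB Q 0 jN 0)
      rw [show 0 + jN + 1 = jN + 1 by omega, ih']
    · rw [show (((jN + 1 : Nat) : Int) - (start - 1)).toNat = 0 from by push_cast; omega]
      show (0 : Int) = _
      rw [bestB_false]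
      intro i h1 h2
      exact hQlow i (by omega)

/-- Same statement for the `Option`-valued scan, when the scan stops at `start ≥ 1`. -/
theorem descFirstO_eq (cond : Int → Bool) (start : Int) (hstart : 1 ≤ start) (Q : Nat → Bool)
    (hQlow : ∀ i : Nat, (i : Int) < start → Q i = false) :
    ∀ jN : Nat,
    (∀ i : Nat, 1 ≤ i → start ≤ (i : Int) → i ≤ jN → Q i = cond (i : Int)) →
    descFirstO cond (jN : Int) (((jN : Int) - (start - 1)).toNat)
      = if bestB Q 0 jN 0 = 0 then none else some (bestB Q 0 jN 0) := by
  intro jN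
  induction jN with
  | zero =>
    intro _
    rw [show (((0 : Nat) : Int) - (start - 1)).toNat = 0 from by omega]
    rfl
  | succ jN ih =>
    intro hQ
    by_cases hmm : start ≤ (jN : Int) + 1
    · rw [show (((jN + 1 : Nat) : Int) - (start - 1)).toNat
          = (((jN : Int) - (start - 1)).toNat) + 1 from by push_cast; omega]
      have hq := hQ (jN + 1) (by omega) (by push_cast; omega) (le_refl _)
      show (if cond ((jN + 1 : Nat) : Int) then some ((jN + 1 : Nat) : Int)
            else descFirstO cond (((jN + 1 : Nat) : Int) - 1) (((jN : Int) - (start - 1)).toNat)) = _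
      rw [← hq, show (((jN + 1 : Nat) : Int) - 1) = ((jN : Nat) : Int) from by push_cast; ring]
      have ih' := ih (fun i h1 h2 h3 => hQ i h1 h2 (by omega))
      show _ = (if bestB Q 0 (jN + 1) 0 = 0 then none else some (bestB Q 0 (jN + 1) 0))
      have hbb : bestB Q 0 (jN + 1) 0
          = if Q (0 + jN + 1) then ((0 + jN + 1 : Nat) : Int) else bestB Q 0 jN 0 := rfl
      by_cases hcase : Q (jN + 1)
      · rw [hcase]
        rw [hbb, show 0 + jN + 1 = jN + 1 by omega, hcase]
        have hne' : ¬ ((jN : Int) + 1 = 0) := by omega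
        simp [hne']
      · rw [Bool.not_eq_true] at hcase
        rw [hcase, ih']
        rw [hbb, show 0 + jN + 1 = jN + 1 by omega, hcase]
        rfl
    · rw [show (((jN + 1 : Nat) : Int) - (start - 1)).toNat = 0 from by push_cast; omega]
      have : bestB Q 0 (jN + 1) 0 = 0 := by
        apply bestB_false
        intro i h1 h2
        exact hQlow i (by omega)
      rw [this]
      rfl

theorem trimLoopA_eq (tseg nstr : String) : ∀ (fuel : Nat) (i : Int),
    trimLoopA tseg nstr i fuel
      = descFirst (fun j => PySem.Str.endswith tseg (PySem.Str.slice nstr none (some j))) i fuel := by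
  intro fuel
  induction fuel with
  | zero => intro i; rfl
  | succ fuel ih =>
    intro i
    show (if PySem.Str.endswith tseg (PySem.Str.slice nstr none (some i)) then i
          else trimLoopA tseg nstr (i - 1) fuel) = _
    rw [ih (i - 1)]
    rfl

theorem trimLoopB_eq (pre suf : List Int) (tseg nstr : String) : ∀ (fuel : Nat) (i : Int),
    trimLoopB pre suf tseg nstr i fuel
      = descFirstO (fun j => decide (PySem.List.pyGetD pre j 0 = PySem.List.pyGetD suf j 0 ∧
          PySem.Str.endswith tseg (PySem.Str.slice nstr none (some j)) = true)) i fuel := by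
  intro fuel
  induction fuel with
  | zero => intro i; rfl
  | succ fuel ih =>
    intro i
    show (if PySem.List.pyGetD pre i 0 = PySem.List.pyGetD suf i 0 ∧
          PySem.Str.endswith tseg (PySem.Str.slice nstr none (some i)) = true then some i
          else trimLoopB pre suf tseg nstr (i - 1) fuel) = _
    rw [ih (i - 1)]
    show _ = (if decide (PySem.List.pyGetD pre i 0 = PySem.List.pyGetD suf i 0 ∧
          PySem.Str.endswith tseg (PySem.Str.slice nstr none (some i)) = true) = true
          then some i else _)
    by_cases h : PySem.List.pyGetD pre i 0 = PySem.List.pyGetD suf i 0 ∧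
        PySem.Str.endswith tseg (PySem.Str.slice nstr none (some i)) = true <;> simp [h]

theorem hashPs_modEq (M : Int) : ∀ (l : List Char) (a b : Int), a ≡ b [ZMOD M] →
    hashPs a l ≡ hashPs b l [ZMOD M] := by
  intro l
  induction l with
  | nil => intro a b h; exact h
  | cons c l ih =>
    intro a b h
    show hashPs (a * 131 + (c.toNat : Int)) l ≡ hashPs (b * 131 + (c.toNat : Int)) l [ZMOD M]
    exact ih _ _ ((h.mul_right 131).add_right _)

theorem getD_zero_preListB (h : Int) (cs : List Char) : (preListB h cs).getD 0 0 = h := by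
  cases cs <;> rfl

theorem getD_zero_sufListB (h pw : Int) (cs : List Char) : (sufListB h pw cs).getD 0 0 = h := by
  cases cs <;> rfl

theorem preListB_getD : ∀ (cs : List Char) (h : Int) (i : Nat), 1 ≤ i → i ≤ cs.length →
    (preListB h cs).getD i 0 = (hashPs h (cs.take i)) % 2305843009213693951 := by
  intro cs
  induction cs with
  | nil => intro h i h1 h2; simp at h2; omega
  | cons c cs ih =>
    intro h i h1 h2
    obtain ⟨i, rfl⟩ : ∃ j, i = j + 1 := ⟨i - 1, by omega⟩
    show (preListB _ cs).getD i 0 = _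
    by_cases hi : 1 ≤ i
    · rw [ih _ i hi (by simpa using h2)]
      show _ = hashPs h (c :: cs.take i) % 2305843009213693951
      show _ = hashPs (h * 131 + (c.toNat : Int)) (cs.take i) % 2305843009213693951
      rw [mod_eq_emod]
      exact hashPs_modEq _ (cs.take i) _ _ (Int.emod_emod_of_dvd _ dvd_rfl)
    · have : i = 0 := by omega
      subst this
      rw [getD_zero_preListB, mod_eq_emod]
      rfl

theorem sufListB_getD : ∀ (cs : List Char) (h pw : Int) (i : Nat), 1 ≤ i → i ≤ cs.length →
    (sufListB h pw cs).getD i 0 = (h + pw * hashR (cs.take i)) % 2305843009213693951 := by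
  intro cs
  induction cs with
  | nil => intro h pw i h1 h2; simp at h2; omega
  | cons c cs ih =>
    intro h pw i h1 h2
    obtain ⟨i, rfl⟩ : ∃ j, i = j + 1 := ⟨i - 1, by omega⟩
    show (sufListB _ _ cs).getD i 0 = _
    have hgoal : (h + pw * hashR ((c :: cs).take (i + 1))) % 2305843009213693951
        = (h + pw * ((c.toNat : Int) + 131 * hashR (cs.take i))) % 2305843009213693951 := rfl
    by_cases hi : 1 ≤ i
    · rw [ih _ _ i hi (by simpa using h2), hgoal]
      have h1' : PySem.Int.mod (h + (c.toNat : Int) * pw) 2305843009213693951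
          ≡ h + (c.toNat : Int) * pw [ZMOD 2305843009213693951] := by
        rw [mod_eq_emod]; exact Int.emod_emod_of_dvd _ dvd_rfl
      have h2' : PySem.Int.mod (pw * 131) 2305843009213693951
          ≡ pw * 131 [ZMOD 2305843009213693951] := by
        rw [mod_eq_emod]; exact Int.emod_emod_of_dvd _ dvd_rfl
      have : PySem.Int.mod (h + (c.toNat : Int) * pw) 2305843009213693951
            + PySem.Int.mod (pw * 131) 2305843009213693951 * hashR (cs.take i)
          ≡ h + pw * ((c.toNat : Int) + 131 * hashR (cs.take i)) [ZMOD 2305843009213693951] := by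
        have := h1'.add (h2'.mul_right (hashR (cs.take i)))
        refine this.trans ?_
        have : h + (c.toNat : Int) * pw + pw * 131 * hashR (cs.take i)
            = h + pw * ((c.toNat : Int) + 131 * hashR (cs.take i)) := by ring
        rw [this]
      exact this
    · have : i = 0 := by omega
      subst this
      rw [getD_zero_sufListB, mod_eq_emod, hgoal]
      show (h + (c.toNat : Int) * pw) % _ = _
      have : h + pw * ((c.toNat : Int) + 131 * hashR (cs.take 0)) = h + (c.toNat : Int) * pw := by
        show h + pw * ((c.toNat : Int) + 131 * hashR []) = _
        show h + pw * ((c.toNat : Int) + 131 * 0) = _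
        ring
      rw [this]

/-- If `new_text[:i]` really is a suffix of `tail_seg`, the two hash-table entries agree. -/
theorem hash_hit (tseg nstr : String) (kN : Nat) (i : Nat)
    (hkt : kN ≤ tseg.toList.length) (hkn : kN ≤ nstr.toList.length)
    (h1 : 1 ≤ i) (hik : i ≤ kN)
    (hend : PySem.Str.endswith tseg (PySem.Str.slice nstr none (some (i : Int))) = true) :
    PySem.List.pyGetD (preListB 0 (PySem.Str.slice nstr none (some (kN : Int))).toList) (i : Int) 0
      = PySem.List.pyGetD (sufListB 0 1
          (PySem.Str.slice (String.ofList tseg.toList.reverse) none (some (kN : Int))).toList) (i : Int) 0 := by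
  have hslice : ∀ (s : String) (m : Nat), (PySem.Str.slice s none (some (m : Int))).toList
      = s.toList.take m := by
    intro s m
    simp [PySem.Str.toList_slice]
  rw [PySem.List.pyGetD_natCast, PySem.List.pyGetD_natCast, hslice, hslice]
  have hrevl : (String.ofList tseg.toList.reverse).toList = tseg.toList.reverse := by simp
  rw [hrevl]
  -- the suffix relation, as a drop equality
  have hsl : (PySem.Str.slice nstr none (some (i : Int))).toList = nstr.toList.take i := hslice nstr i
  rw [PySem.Str.endswith_eq, hsl] at hend
  have hsuf := (PySem.Chars.endswith_iff _ _).mp hend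
  obtain ⟨s, hs⟩ := hsuf
  have hlen : s.length + i = tseg.toList.length := by
    have hl := congrArg List.length hs
    rw [List.length_append, List.length_take] at hl
    omega
  have hdrop : tseg.toList.drop (tseg.toList.length - i) = nstr.toList.take i := by
    rw [show tseg.toList = s ++ nstr.toList.take i from hs.symm,
      show (s ++ nstr.toList.take i).length - i = s.length from by
        rw [List.length_append, List.length_take]
        omega,
      List.drop_left]
  -- evaluate both table entries
  rw [preListB_getD _ _ i h1 (by rw [List.length_take]; omega),
    sufListB_getD _ _ _ i h1 (by rw [List.length_take, List.length_reverse]; omega)]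
  have htt : (nstr.toList.take kN).take i = nstr.toList.take i := by
    rw [List.take_take]; congr 1; omega
  have hrt : (tseg.toList.reverse.take kN).take i = tseg.toList.reverse.take i := by
    rw [List.take_take]; congr 1; omega
  rw [htt, hrt]
  have hsufhash : hashR (tseg.toList.reverse.take i) = hashP (nstr.toList.take i) := by
    have : tseg.toList.reverse.take i = (tseg.toList.drop (tseg.toList.length - i)).reverse :=
      List.take_reverse
    rw [this, ← hashP_eq_hashR_reverse, hdrop]
  rw [hsufhash]
  have : (0 : Int) + 1 * hashP (nstr.toList.take i) = hashPs 0 (nstr.toList.take i) := by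
    show _ = hashP (nstr.toList.take i); ring
  rw [this]

-- ===== VERDICT (by name: the statement is the Claim_ definition above) =====
theorem trim_overlap_spec : Claim_equal_trim_overlap := by
  intro acc_text new_text tail min_match _
  unfold Spec_trim_overlap trim_overlap trim_overlap_alt
  by_cases hguard : acc_text = "" || new_text = ""
  · simp [hguard]
  · simp only [hguard, Bool.false_eq_true, if_false]
    set tseg := PySem.Str.slice acc_text (some (-tail)) none with htseg
    set kN : Nat := min tseg.toList.length new_text.toList.length with hkN
    have hkInt : min (PySem.Str.len tseg) (PySem.Str.len new_text) = ((kN : Nat) : Int) := by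
      rw [PySem.Str.len_eq, PySem.Str.len_eq, hkN]
      push_cast; rfl
    set Q : Nat → Bool := fun i =>
      decide (max min_match 1 ≤ (i : Int)) &&
        PySem.Str.endswith tseg (PySem.Str.slice new_text none (some (i : Int))) with hQ
    rw [hkInt]
    set pre := preListB 0 (PySem.Str.slice new_text none (some ((kN : Nat) : Int))).toList with hpre
    set suf := sufListB 0 1 (PySem.Str.slice (String.ofList tseg.toList.reverse) none
        (some ((kN : Nat) : Int))).toList with hsuf
    -- A side
    have hA : trimLoopA tseg new_text ((kN : Nat) : Int)
        ((((kN : Nat) : Int) - (min_match - 1)).toNat) = bestB Q 0 kN 0 := by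
      rw [trimLoopA_eq]
      apply descFirst_eq
      · intro i hlow
        show (decide (max min_match 1 ≤ (i : Int)) &&
          PySem.Str.endswith tseg (PySem.Str.slice new_text none (some (i : Int)))) = false
        have : decide (max min_match 1 ≤ (i : Int)) = false := by
          simp only [decide_eq_false_iff_not]; omega
        rw [this, Bool.false_and]
      · intro hmm
        rw [PySem.Str.endswith_eq, PySem.Chars.endswith_iff]
        have : (PySem.Str.slice new_text none (some 0)).toList = [] := by
          rw [PySem.Str.toList_slice, PySem.Chars.slice,
            PySem.List.slice_to new_text.toList (le_refl (0 : Int))]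
          rfl
        rw [this]
        exact List.nil_suffix
      · intro i h1 h2 h3
        show (decide (max min_match 1 ≤ (i : Int)) &&
          PySem.Str.endswith tseg (PySem.Str.slice new_text none (some (i : Int)))) = _
        have : decide (max min_match 1 ≤ (i : Int)) = true := by
          simp only [decide_eq_true_eq]; omega
        rw [this, Bool.true_and]
    -- B side
    have hB : trimLoopB pre suf tseg new_text ((kN : Nat) : Int)
          ((((kN : Nat) : Int) - (max min_match 1 - 1)).toNat)
        = if bestB Q 0 kN 0 = 0 then none else some (bestB Q 0 kN 0) := by
      rw [trimLoopB_eq]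
      apply descFirstO_eq _ _ (le_max_right _ _)
      · intro i hlow
        show (decide (max min_match 1 ≤ (i : Int)) &&
          PySem.Str.endswith tseg (PySem.Str.slice new_text none (some (i : Int)))) = false
        have : decide (max min_match 1 ≤ (i : Int)) = false := by
          simp only [decide_eq_false_iff_not]; omega
        rw [this, Bool.false_and]
      · intro i h1 h2 h3
        show (decide (max min_match 1 ≤ (i : Int)) &&
          PySem.Str.endswith tseg (PySem.Str.slice new_text none (some (i : Int)))) = _
        have hd : decide (max min_match 1 ≤ (i : Int)) = true := by
          simp only [decide_eq_true_eq]; omega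
        rw [hd, Bool.true_and]
        by_cases hend : PySem.Str.endswith tseg (PySem.Str.slice new_text none (some (i : Int))) = true
        · have hhit := hash_hit tseg new_text kN i (by omega) (by omega) h1 (by omega) hend
          rw [hend]
          rw [hpre, hsuf]
          simpa using hhit
        · rw [Bool.not_eq_true] at hend
          rw [hend]
          simp
    rw [hA, hB]
    have hnn : 0 ≤ bestB Q 0 kN 0 := bestB_nonneg Q 0 kN 0 (le_refl 0)
    by_cases hz : bestB Q 0 kN 0 = 0
    · rw [hz]
      simp
    · rw [if_neg hz]
      have : bestB Q 0 kN 0 > 0 := by omega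
      simp [this]
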